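-- pv_equiv track=rewrite | github.com/miliar/Code_Jam_Webscraper | solutions_python/Problem_138/1250.py | war_score
-- ===== SOURCE A (Python) =====
-- def getBlockIndex(num, ken_blocks):
--     i = 0
--     while(ken_blocks[i] < num):
--         i += 1
--     return i
--
-- def war_score(nomi_blocks, ken_blocks):
--     ans = 0
--     while(True):
--         if(len(nomi_blocks) == 0):
--             return ans
--         if(nomi_blocks[0] > ken_blocks[-1]):
--             nomi_blocks.pop(0)
--             ken_blocks.pop(0)
--             ans += 1
--         else:
--             i = getBlockIndex(nomi_blocks[0], ken_blocks)
--             nomi_blocks.pop(0)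
--             ken_blocks.pop(i)
-- ===== SOURCE B (Python) =====
-- def war_score(nomi_blocks, ken_blocks):
--     ken = list(ken_blocks)
--     head = 0          # ken[head:] is Ken's live hand: the front is retired lazily, never shifted out
--     ans = 0
--     for x in nomi_blocks:
--         if x > ken[-1]:
--             head += 1
--             ans += 1
--         else:
--             j = head
--             while ken[j] < x:
--                 j += 1
--             del ken[j]
--     return ans
-- ===== Notes on version B (the rewrite author's own statement) =====
-- stated objective: alternative
-- what changed: A runs a while-True loop that pops the front of both argument lists (pop(0)) each round and re-searches with a helper from index 0; B is a single for-loop over nomi_blocks that keeps one private copy of ken_blocks with a lazy head index (the beaten front is retired by moving head, never shifted out) and deletes the first surviving block >= x in place, so B never mutates its arguments and avoids all front-of-list shifting.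
import Mathlib
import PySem

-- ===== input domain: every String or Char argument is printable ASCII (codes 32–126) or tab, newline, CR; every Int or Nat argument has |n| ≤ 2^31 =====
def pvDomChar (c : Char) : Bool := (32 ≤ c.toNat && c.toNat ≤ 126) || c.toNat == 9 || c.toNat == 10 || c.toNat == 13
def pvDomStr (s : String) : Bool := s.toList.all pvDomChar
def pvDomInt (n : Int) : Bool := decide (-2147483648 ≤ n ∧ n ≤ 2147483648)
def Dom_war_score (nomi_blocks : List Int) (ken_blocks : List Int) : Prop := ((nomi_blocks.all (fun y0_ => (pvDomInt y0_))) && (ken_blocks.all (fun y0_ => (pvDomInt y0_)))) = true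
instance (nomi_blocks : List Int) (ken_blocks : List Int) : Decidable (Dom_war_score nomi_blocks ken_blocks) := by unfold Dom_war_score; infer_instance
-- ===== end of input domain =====

-- B replaces A's while-loop, which pops the front of both argument lists and rescans a shrinking
-- list, by a single for-loop over nomi_blocks with a lazy head index into one private copy of
-- ken_blocks (the retired front is never shifted out). A empties both argument lists in place;
-- B leaves its arguments untouched — the equivalence proved here is about the return value.

-- ===== PORT A =====
-- helper getBlockIndex: 'i = 0; while ken_blocks[i] < num: i += 1; return i'.
-- fuel is only a termination device (ken.length + 1 steps always suffice to leave the list);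
-- the 'none' arm is Python's IndexError, unreachable whenever some element ≥ num exists.
def getBlockIndexGo (num : Int) (ken_blocks : List Int) (i : Nat) (fuel : Nat) : Nat :=
  match fuel with
  | 0 => i
  | fuel + 1 =>
    match PySem.List.pyGet? ken_blocks (i : Int) with
    | none => i
    | some v => if v < num then getBlockIndexGo num ken_blocks (i + 1) fuel else i

def getBlockIndex (num : Int) (ken_blocks : List Int) : Nat :=
  getBlockIndexGo num ken_blocks 0 (ken_blocks.length + 1)

-- the while(True) loop of A: state (nomi_blocks, ken_blocks, ans); each pass pops nomi_blocks[0],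
-- so it is structural recursion on nomi_blocks. 'none' arms are Python's IndexError (excluded by Pre_).
def warLoop (nomi_blocks : List Int) (ken_blocks : List Int) (ans : Int) : Int :=
  match nomi_blocks with
  | [] => ans
  | x :: rest =>
    match PySem.List.pyGet? ken_blocks (-1) with
    | none => ans
    | some klast =>
      if x > klast then
        warLoop rest (ken_blocks.drop 1) (ans + 1)        -- nomi.pop(0); ken.pop(0); ans += 1
      else
        match PySem.List.pop? ken_blocks ((getBlockIndex x ken_blocks : Nat) : Int) with
        | none => ans
        | some r => warLoop rest r.2 ans                  -- nomi.pop(0); ken.pop(i)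

def war_score (nomi_blocks : List Int) (ken_blocks : List Int) : Int :=
  warLoop nomi_blocks ken_blocks 0

-- ===== PORT B =====
-- inner 'while ken[j] < x: j += 1' of B; fuel is only a termination device
-- (the 'none' arm is Python's IndexError, unreachable under Pre_)
def findGeFrom (x : Int) (ken : List Int) (j : Nat) (fuel : Nat) : Nat :=
  match fuel with
  | 0 => j
  | fuel + 1 =>
    match PySem.List.pyGet? ken (j : Int) with
    | none => j
    | some v => if v < x then findGeFrom x ken (j + 1) fuel else j

-- body of B's for-loop over nomi_blocks, state (ans, head, ken): ken[head:] is the live hand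
def altStep (st : Int × Nat × List Int) (x : Int) : Int × Nat × List Int :=
  match PySem.List.pyGet? st.2.2 (-1) with
  | none => st                                            -- Python: IndexError (excluded by Pre_)
  | some klast =>
    if x > klast then (st.1 + 1, st.2.1 + 1, st.2.2)      -- head += 1; ans += 1
    else
      (st.1, st.2.1, st.2.2.eraseIdx (findGeFrom x st.2.2 st.2.1 (st.2.2.length + 1)))
                                                          -- del ken[j] at the found j
def war_score_alt (nomi_blocks : List Int) (ken_blocks : List Int) : Int :=
  (nomi_blocks.foldl altStep (0, 0, ken_blocks)).1

-- ===== PRECONDITION & SPEC =====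
-- A pops one element of each list per pass, so when nomi_blocks is longer than ken_blocks,
-- ken_blocks runs out first and 'ken_blocks[-1]' raises IndexError; Pre_ excludes exactly that.
def Pre_war_score (nomi_blocks : List Int) (ken_blocks : List Int) : Prop :=
  nomi_blocks.length ≤ ken_blocks.length
instance (nomi_blocks : List Int) (ken_blocks : List Int) : Decidable (Pre_war_score nomi_blocks ken_blocks) := by unfold Pre_war_score; infer_instance

def pvWitness_war_score : List Int × List Int := ([2, 1], [3, 0, 4])

def Spec_war_score (nomi_blocks : List Int) (ken_blocks : List Int) (out : Int) : Prop := out = war_score_alt nomi_blocks ken_blocks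
instance (nomi_blocks : List Int) (ken_blocks : List Int) (out : Int) : Decidable (Spec_war_score nomi_blocks ken_blocks out) := by unfold Spec_war_score; infer_instance

-- ===== CLAIM (what is proved, stated in full; the proofs are below) =====
def Claim_equal_war_score : Prop := ∀ (nomi_blocks : List Int) (ken_blocks : List Int), Dom_war_score nomi_blocks ken_blocks → Pre_war_score nomi_blocks ken_blocks → Spec_war_score nomi_blocks ken_blocks (war_score nomi_blocks ken_blocks)

-- ===== LEMMAS AND PROOFS =====

-- A's index search (and B's, which shares its loop) lands on the length of the
-- strict prefix of the scanned region, provided some element ≥ x exists there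
lemma getBlockIndexGo_eq (x : Int) (ken : List Int) : ∀ (fuel i : Nat),
    ken.length - i ≤ fuel → (∃ v ∈ ken.drop i, x ≤ v) →
    getBlockIndexGo x ken i fuel = i + ((ken.drop i).takeWhile (fun v => v < x)).length := by
  intro fuel
  induction fuel with
  | zero =>
    intro i hfuel hex
    have : ken.length ≤ i := by omega
    simp [List.drop_eq_nil_of_le this] at hex
  | succ fuel ih =>
    intro i hfuel hex
    by_cases hi : i < ken.length
    · have hdrop : ken.drop i = ken[i] :: ken.drop (i + 1) :=
        (List.getElem_cons_drop hi).symm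
      rw [getBlockIndexGo, PySem.List.pyGet?_natCast, List.getElem?_eq_getElem hi]
      dsimp only
      by_cases hv : ken[i] < x
      · have hex' : ∃ v ∈ ken.drop (i + 1), x ≤ v := by
          obtain ⟨v, hvmem, hvx⟩ := hex
          rw [hdrop] at hvmem
          rcases List.mem_cons.mp hvmem with h | h
          · omega
          · exact ⟨v, h, hvx⟩
        rw [if_pos hv, ih (i + 1) (by omega) hex', hdrop, List.takeWhile_cons]
        simp [hv]; omega
      · rw [if_neg hv, hdrop, List.takeWhile_cons]
        simp [hv]
    · rw [List.drop_eq_nil_of_le (by omega)] at hex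
      simp at hex

-- B's inner while-loop is the same scan as A's helper
lemma findGeFrom_eq_go (x : Int) (ken : List Int) : ∀ (fuel j : Nat),
    findGeFrom x ken j fuel = getBlockIndexGo x ken j fuel := by
  intro fuel
  induction fuel with
  | zero => intro j; rfl
  | succ fuel ih =>
    intro j
    rw [findGeFrom, getBlockIndexGo]
    cases PySem.List.pyGet? ken (j : Int) with
    | none => rfl
    | some v => dsimp only; rw [ih]

lemma getBlockIndex_eq (x : Int) (ken : List Int) (hex : ∃ v ∈ ken, x ≤ v) :
    getBlockIndex x ken = (ken.takeWhile (fun v => v < x)).length := by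
  have := getBlockIndexGo_eq x ken (ken.length + 1) 0 (by omega) (by simpa using hex)
  simpa [getBlockIndex] using this

-- if some element is ≥ x, the strict prefix is a proper prefix
lemma takeWhile_lt_length (x : Int) (ken : List Int) (hex : ∃ v ∈ ken, x ≤ v) :
    (ken.takeWhile (fun v => v < x)).length < ken.length := by
  have hd : ken.dropWhile (fun v => v < x) ≠ [] := by
    intro hnil
    obtain ⟨v, hvmem, hvx⟩ := hex
    have := List.dropWhile_eq_nil_iff.mp hnil
    have := this v hvmem
    simp at this; omega
  have hsplit := List.takeWhile_append_dropWhile (p := fun v => v < x) (l := ken)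
  have : (ken.takeWhile (fun v => v < x)).length + (ken.dropWhile (fun v => v < x)).length
      = ken.length := by
    rw [← List.length_append, hsplit]
  have : 0 < (ken.dropWhile (fun v => v < x)).length := List.length_pos_iff.mpr hd
  omega

-- erasing at the strict-prefix boundary keeps the prefix and beheads the rest (no side condition)
lemma eraseIdx_takeWhile_len (x : Int) (ken : List Int) :
    ken.eraseIdx ((ken.takeWhile (fun v => v < x)).length)
      = ken.takeWhile (fun v => v < x) ++ (ken.dropWhile (fun v => v < x)).drop 1 := by
  have h := List.eraseIdx_append_of_length_le
    (le_refl (ken.takeWhile (fun v => v < x)).length) (ken.dropWhile (fun v => v < x))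
  rw [List.takeWhile_append_dropWhile] at h
  simpa [List.drop_one] using h

-- A's pop(i) at the found index removes exactly the first element ≥ x
lemma pop_getBlockIndex (x : Int) (ken : List Int) (hex : ∃ v ∈ ken, x ≤ v) :
    ∃ v, PySem.List.pop? ken ((getBlockIndex x ken : Nat) : Int)
      = some (v, ken.takeWhile (fun w => w < x) ++ (ken.dropWhile (fun w => w < x)).drop 1) := by
  have hlt : getBlockIndex x ken < ken.length := by
    rw [getBlockIndex_eq x ken hex]; exact takeWhile_lt_length x ken hex
  refine ⟨ken[getBlockIndex x ken]'hlt, ?_⟩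
  rw [PySem.List.pop?_natCast ken (getBlockIndex x ken) hlt]
  simp only [Option.some.injEq, Prod.mk.injEq]
  exact ⟨trivial, by rw [getBlockIndex_eq x ken hex, eraseIdx_takeWhile_len]⟩

lemma length_after_remove (x : Int) (ken : List Int) (hex : ∃ v ∈ ken, x ≤ v) :
    (ken.takeWhile (fun w => w < x) ++ (ken.dropWhile (fun w => w < x)).drop 1).length + 1
      = ken.length := by
  have hd : (ken.dropWhile (fun w => w < x)) ≠ [] := by
    intro hnil
    obtain ⟨v, hvmem, hvx⟩ := hex
    have := List.dropWhile_eq_nil_iff.mp hnil v hvmem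
    simp at this; omega
  have hlen : (ken.takeWhile (fun w => w < x)).length + (ken.dropWhile (fun w => w < x)).length
      = ken.length := by
    rw [← List.length_append, List.takeWhile_append_dropWhile]
  have hpos : 0 < (ken.dropWhile (fun w => w < x)).length := List.length_pos_iff.mpr hd
  simp; omega

-- main correspondence: A's while-loop on its live list equals B's fold on
-- (score, head, retired ++ live), where head counts the retired prefix
lemma warLoop_eq_fold : ∀ (nomi retired kenA : List Int) (ans : Int),
    nomi.length ≤ kenA.length →
    warLoop nomi kenA ans = (nomi.foldl altStep (ans, retired.length, retired ++ kenA)).1 := by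
  intro nomi
  induction nomi with
  | nil => intro retired kenA ans _; rfl
  | cons x rest ih =>
    intro retired kenA ans hlen
    have hne : kenA ≠ [] := by
      intro h; subst h; simp at hlen
    have hklastA : PySem.List.pyGet? kenA (-1) = some (kenA.getLast hne) := by
      rw [PySem.List.pyGet?_neg_one, List.getLast?_eq_some_getLast]
    have hklastB : PySem.List.pyGet? (retired ++ kenA) (-1) = some (kenA.getLast hne) := by
      rw [PySem.List.pyGet?_neg_one, List.getLast?_append_of_ne_nil retired hne,
        List.getLast?_eq_some_getLast]
    rw [warLoop, List.foldl_cons, hklastA]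
    have hstep : altStep (ans, retired.length, retired ++ kenA) x =
        if x > kenA.getLast hne then (ans + 1, retired.length + 1, retired ++ kenA)
        else (ans, retired.length,
          (retired ++ kenA).eraseIdx
            (findGeFrom x (retired ++ kenA) retired.length ((retired ++ kenA).length + 1))) := by
      simp only [altStep, hklastB]
    rw [hstep]
    dsimp only
    by_cases hgt : x > kenA.getLast hne
    · rw [if_pos hgt, if_pos hgt]
      obtain ⟨k0, ktail, rfl⟩ := List.exists_cons_of_ne_nil hne
      have h1 : retired ++ k0 :: ktail = (retired ++ [k0]) ++ ktail := by simp
      have h2 : retired.length + 1 = (retired ++ [k0]).length := by simp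
      rw [h1, h2, List.drop_one, List.tail_cons]
      exact ih (retired ++ [k0]) ktail (ans + 1) (by simp at hlen ⊢; omega)
    · rw [if_neg hgt, if_neg hgt]
      have hex : ∃ v ∈ kenA, x ≤ v :=
        ⟨kenA.getLast hne, List.getLast_mem hne, not_lt.mp hgt⟩
      obtain ⟨v, hpop⟩ := pop_getBlockIndex x kenA hex
      rw [hpop]
      -- identify B's found index and the erased list
      have hdrop : (retired ++ kenA).drop retired.length = kenA := by
        simp
      have hexB : ∃ v ∈ (retired ++ kenA).drop retired.length, x ≤ v := by
        rw [hdrop]; exact hex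
      have hj : findGeFrom x (retired ++ kenA) retired.length ((retired ++ kenA).length + 1)
          = retired.length + (kenA.takeWhile (fun w => w < x)).length := by
        rw [findGeFrom_eq_go,
          getBlockIndexGo_eq x (retired ++ kenA) ((retired ++ kenA).length + 1)
            retired.length (by omega) hexB, hdrop]
      have herase : (retired ++ kenA).eraseIdx
            (retired.length + (kenA.takeWhile (fun w => w < x)).length)
          = retired ++ (kenA.takeWhile (fun w => w < x) ++ (kenA.dropWhile (fun w => w < x)).drop 1) := by
        rw [List.eraseIdx_append_of_length_le (by omega), Nat.add_sub_cancel_left,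
          eraseIdx_takeWhile_len]
      rw [hj, herase]
      have hlen' : rest.length ≤
          (kenA.takeWhile (fun w => w < x) ++ (kenA.dropWhile (fun w => w < x)).drop 1).length := by
        have := length_after_remove x kenA hex
        simp at hlen; omega
      exact ih retired _ ans hlen'

-- ===== VERDICT (by name: the statement is the Claim_ definition above) =====
theorem war_score_spec : Claim_equal_war_score := by
  intro nomi ken _ hpre
  show war_score nomi ken = war_score_alt nomi ken
  have := warLoop_eq_fold nomi [] ken 0 hpre
  simpa [war_score, war_score_alt] using this
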